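-- pv_equiv track=rewrite | github.com/BhavikDodda/GridTokenGame | playwithpdf2.py | generate_component_transformations
-- ===== SOURCE A (Python) =====
-- def rotate_component(component):
--     """Rotate a component 90 degrees counterclockwise."""
--     return [(-y, x) for x, y in component]
--
-- def flip_component(component, axis='horizontal'):
--     """Flip a component horizontally or vertically."""
--     if axis == 'horizontal':
--         return [(x, -y) for x, y in component]
--     elif axis == 'vertical':
--         return [(-x, y) for x, y in component]
--     else:
--         raise ValueError("Invalid axis. Use 'horizontal' or 'vertical'.")
--
-- def generate_component_transformations(component):
--     transformations = []
--     current = component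
--     for _ in range(4):  # Rotate 0°, 90°, 180°, 270°
--         transformations.append(current)
--         transformations.append(flip_component(current, axis='horizontal'))  # Flip horizontally
--         transformations.append(flip_component(current, axis='vertical'))  # Flip vertically
--         current = rotate_component(current)  # Rotate 90°
--     return transformations
-- ===== SOURCE B (Python) =====
-- _MAPS = [
--     (1, 0, 0, 1), (1, 0, 0, -1), (-1, 0, 0, 1),
--     (0, -1, 1, 0), (0, -1, -1, 0), (0, 1, 1, 0),
--     (-1, 0, 0, -1), (-1, 0, 0, 1), (1, 0, 0, -1),
--     (0, 1, -1, 0), (0, 1, 1, 0), (0, -1, -1, 0),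
-- ]
--
-- def generate_component_transformations(component):
--     return [[(a * x + b * y, c * x + d * y) for x, y in component]
--             for a, b, c, d in _MAPS]
-- ===== Notes on version B (the rewrite author's own statement) =====
-- stated objective: simpler
-- what changed: Replaced A's iterative rotate-compounding loop with three flip/rotate helpers by a single precomputed table of 12 linear-coefficient maps (a,b,c,d) applied to the points in one comprehension.
import Mathlib
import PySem

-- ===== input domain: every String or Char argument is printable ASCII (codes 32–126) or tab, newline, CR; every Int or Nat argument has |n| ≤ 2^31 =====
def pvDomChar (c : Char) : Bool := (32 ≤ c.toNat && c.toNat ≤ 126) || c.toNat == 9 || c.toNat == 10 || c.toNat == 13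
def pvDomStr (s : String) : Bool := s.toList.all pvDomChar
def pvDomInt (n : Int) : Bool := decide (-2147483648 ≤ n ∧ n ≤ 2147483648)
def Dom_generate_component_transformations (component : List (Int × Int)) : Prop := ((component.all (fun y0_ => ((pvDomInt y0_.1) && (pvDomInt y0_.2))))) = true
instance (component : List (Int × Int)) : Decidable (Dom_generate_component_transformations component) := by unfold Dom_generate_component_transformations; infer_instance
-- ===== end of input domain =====

-- ===== PORT A =====
-- B replaces A's iterative rotate-compounding with a fixed 12-entry coefficient table applied in one pass (objective: simpler).
def rotate_component (component : List (Int × Int)) : List (Int × Int) :=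
  component.map (fun p => (-p.2, p.1))

def flip_component_horizontal (component : List (Int × Int)) : List (Int × Int) :=
  component.map (fun p => (p.1, -p.2))

def flip_component_vertical (component : List (Int × Int)) : List (Int × Int) :=
  component.map (fun p => (-p.1, p.2))

def generate_component_transformations (component : List (Int × Int)) : List (List (Int × Int)) :=
  let st := (PySem.List.pyRange 0 4 1).foldl
    (fun (st : List (List (Int × Int)) × List (Int × Int)) _ =>
      let (transformations, current) := st
      (transformations ++ [current, flip_component_horizontal current, flip_component_vertical current],
       rotate_component current))
    ([], component)
  st.1

-- ===== PORT B =====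
def pvMaps : List (Int × Int × Int × Int) :=
  [(1, 0, 0, 1), (1, 0, 0, -1), (-1, 0, 0, 1),
   (0, -1, 1, 0), (0, -1, -1, 0), (0, 1, 1, 0),
   (-1, 0, 0, -1), (-1, 0, 0, 1), (1, 0, 0, -1),
   (0, 1, -1, 0), (0, 1, 1, 0), (0, -1, -1, 0)]

def generate_component_transformations_alt (component : List (Int × Int)) : List (List (Int × Int)) :=
  pvMaps.map (fun m =>
    component.map (fun p =>
      (m.1 * p.1 + m.2.1 * p.2, m.2.2.1 * p.1 + m.2.2.2 * p.2)))

-- ===== PRECONDITION & SPEC =====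
def Spec_generate_component_transformations (component : List (Int × Int)) (out : List (List (Int × Int))) : Prop := out = generate_component_transformations_alt component
instance (component : List (Int × Int)) (out : List (List (Int × Int))) : Decidable (Spec_generate_component_transformations component out) := by unfold Spec_generate_component_transformations; infer_instance

-- ===== CLAIM (what is proved, stated in full; the proofs are below) =====
def Claim_equal_generate_component_transformations : Prop := ∀ (component : List (Int × Int)), Dom_generate_component_transformations component → Spec_generate_component_transformations component (generate_component_transformations component)

-- ===== LEMMAS AND PROOFS =====

-- ===== VERDICT (by name: the statement is the Claim_ definition above) =====
theorem generate_component_transformations_spec : Claim_equal_generate_component_transformations := by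
  intro component _
  unfold Spec_generate_component_transformations
  unfold generate_component_transformations generate_component_transformations_alt pvMaps
    rotate_component flip_component_horizontal flip_component_vertical
  simp [PySem.List.pyRange, List.range_succ, List.map_map, Function.comp, neg_neg]
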